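-- pv_equiv track=rewrite | github.com/Tanmay53/cohort_3 | submissions/sm_105_ashish/week_13/day_5/pyramid_play.py | pyramid_arr
-- ===== SOURCE A (Python) =====
-- def pyramid_arr(level):
--     final_arr = []
--     for j in range(level):
--         arr  = []
--         for i in range(level*2+1-2*j):
--             arr.append(".") if i%2 == 0 else arr.append("0")
--         final_arr.append(arr)
--         arr = []
--     final_arr.reverse()
--     for k in range(len(final_arr)-1):
--         for _ in range(k,len(final_arr)-1):
--             final_arr[k].append(".")
--             final_arr[k].reverse()
--             final_arr[k].append(".")
--     return final_arr
-- ===== SOURCE B (Python) =====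
-- def pyramid_arr(level):
--     # Each row k is built directly: (level-k) dots, an alternating 0/. core of
--     # length 2k+1 starting with "0", then (level-k) dots.  O(level^2) total.
--     result = []
--     for k in range(level):
--         pad = ["."] * (level - k)
--         core = ["0" if i % 2 == 0 else "." for i in range(2 * k + 1)]
--         result.append(pad + core + pad)
--     return result
-- ===== Notes on version B (the rewrite author's own statement) =====
-- stated objective: faster
-- what changed: B builds each row directly as pad++alternating-core++pad instead of A's building narrow rows and then repeatedly appending a dot and reversing each row in a quadratic fix-up loop.
import Mathlib
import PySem

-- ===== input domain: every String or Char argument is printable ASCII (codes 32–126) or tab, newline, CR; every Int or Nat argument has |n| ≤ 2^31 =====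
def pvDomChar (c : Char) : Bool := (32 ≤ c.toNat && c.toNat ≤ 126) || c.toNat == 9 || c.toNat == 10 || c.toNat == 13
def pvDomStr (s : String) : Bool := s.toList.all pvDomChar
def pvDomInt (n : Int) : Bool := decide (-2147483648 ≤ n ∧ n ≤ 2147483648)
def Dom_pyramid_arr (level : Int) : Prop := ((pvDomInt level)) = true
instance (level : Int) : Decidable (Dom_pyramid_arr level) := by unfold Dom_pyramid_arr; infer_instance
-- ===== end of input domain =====

-- B replaces A's build-then-fix-up (repeated append+reverse per row in a quadratic padding loop)
-- with a direct pad ++ alternating-core ++ pad construction of each row; measured faster.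


-- ===== PORT A =====
-- first loop: for j in range(level): build arr with alternating "."/"0" and append it
def pyAFirst (level : Int) : List (List String) :=
  (PySem.List.pyRange 0 level 1).foldl (fun final_arr j =>
    let arr : List String :=
      (PySem.List.pyRange 0 (level * 2 + 1 - 2 * j) 1).foldl (fun arr i =>
        if PySem.Int.mod i 2 == 0 then arr ++ ["."] else arr ++ ["0"]) []
    final_arr ++ [arr]) []

-- one iteration of the padding loop body: final_arr[k].append("."); .reverse(); .append(".")
-- (an in-place update of entry k; k comes from range(len(final_arr)-1), so it is a valid
-- nonnegative index and List.modify at k.toNat is exact)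
def pyAStep (fa : List (List String)) (k : Int) : List (List String) :=
  (PySem.List.pyRange k ((fa.length : Int) - 1) 1).foldl (fun fa _ =>
    fa.modify k.toNat (fun row => (row ++ ["."]).reverse ++ ["."])) fa

-- second loop: for k in range(len(final_arr)-1): for _ in range(k, len(final_arr)-1): …
def pyASecond (final_arr : List (List String)) : List (List String) :=
  (PySem.List.pyRange 0 ((final_arr.length : Int) - 1) 1).foldl pyAStep final_arr

def pyramid_arr (level : Int) : List (List String) :=
  pyASecond (pyAFirst level).reverse

-- ===== PORT B =====
def pyramid_arr_alt (level : Int) : List (List String) :=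
  (PySem.List.pyRange 0 level 1).foldl (fun result k =>
    let pad := PySem.List.pyRepeat ["."] (level - k)
    let core := (PySem.List.pyRange 0 (2 * k + 1) 1).map
      (fun i => if PySem.Int.mod i 2 == 0 then "0" else ".")
    result ++ [pad ++ core ++ pad]) []

-- ===== PRECONDITION & SPEC =====
def Spec_pyramid_arr (level : Int) (out : List (List String)) : Prop := out = pyramid_arr_alt level
instance (level : Int) (out : List (List String)) : Decidable (Spec_pyramid_arr level out) := by unfold Spec_pyramid_arr; infer_instance

-- ===== CLAIM (what is proved, stated in full; the proofs are below) =====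
def Claim_equal_pyramid_arr : Prop := ∀ (level : Int), Dom_pyramid_arr level → Spec_pyramid_arr level (pyramid_arr level)

-- ===== LEMMAS AND PROOFS =====

-- proof-side vocabulary: the alternating core, B's padded row, A's raw row, A's padding step
def coreL (k : Nat) : List String :=
  (List.range (2 * k + 1)).map (fun i => if i % 2 = 0 then "0" else ".")

def rowB (p k : Nat) : List String :=
  List.replicate p "." ++ coreL k ++ List.replicate p "."

def altRow (m : Nat) : List String :=
  (List.range m).map (fun i => if i % 2 = 0 then "." else "0")

def Trow (row : List String) : List String := (row ++ ["."]).reverse ++ ["."]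

theorem coreL_length (k : Nat) : (coreL k).length = 2 * k + 1 := by simp [coreL]

theorem coreL_getElem? (k i : Nat) :
    (coreL k)[i]? = if i < 2 * k + 1 then some (if i % 2 = 0 then "0" else ".") else none := by
  simp [coreL, List.getElem?_map]
  split_ifs <;> simp_all

theorem altRow_getElem? (m i : Nat) :
    (altRow m)[i]? = if i < m then some (if i % 2 = 0 then "." else "0") else none := by
  simp [altRow, List.getElem?_map]
  split_ifs <;> simp_all

theorem rowB_getElem? (p k i : Nat) :
    (rowB p k)[i]? =
      if i < 2 * p + 2 * k + 1 then
        some (if p ≤ i ∧ i ≤ p + 2 * k ∧ (i - p) % 2 = 0 then "0" else ".")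
      else none := by
  simp [rowB, List.getElem?_append, coreL_getElem?, List.getElem?_replicate, coreL_length]
  split_ifs <;> simp_all <;> omega

theorem replicate_dot_comm (p : Nat) :
    List.replicate p "." ++ ["."] = "." :: List.replicate p "." := by
  rw [← List.replicate_succ', ← List.replicate_succ]

theorem coreL_reverse (k : Nat) : (coreL k).reverse = coreL k := by
  apply List.ext_getElem?
  intro i
  have hlen : (coreL k).length = 2 * k + 1 := coreL_length k
  rcases Nat.lt_or_ge i (2 * k + 1) with h | h
  · rw [List.getElem?_reverse (by omega), hlen, coreL_getElem?, coreL_getElem?]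
    have h2 : 2 * k + 1 - 1 - i < 2 * k + 1 := by omega
    rw [if_pos h2, if_pos h]
    have hpar : (2 * k + 1 - 1 - i) % 2 = i % 2 := by omega
    rw [hpar]
  · rw [List.getElem?_eq_none (by simpa using (by omega : (coreL k).length ≤ i)),
        List.getElem?_eq_none (by omega)]

theorem rowB_reverse (p k : Nat) : (rowB p k).reverse = rowB p k := by
  simp [rowB, List.reverse_append, coreL_reverse, List.reverse_replicate, List.append_assoc]

theorem Trow_rowB (p k : Nat) : Trow (rowB p k) = rowB (p + 1) k := by
  unfold Trow
  rw [List.reverse_append, rowB_reverse]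
  calc (["."].reverse ++ rowB p k) ++ ["."]
      = "." :: (List.replicate p "." ++ (coreL k ++ (List.replicate p "." ++ ["."]))) := by
        simp [rowB]
    _ = "." :: (List.replicate p "." ++ (coreL k ++ ("." :: List.replicate p "."))) := by
        rw [replicate_dot_comm]
    _ = rowB (p + 1) k := by simp [rowB, List.replicate_succ]

theorem Trow_iter_rowB (m p k : Nat) : Trow^[m] (rowB p k) = rowB (p + m) k := by
  induction m generalizing p with
  | zero => simp
  | succ m ih =>
      rw [Function.iterate_succ_apply, Trow_rowB, ih]
      congr 1
      omega

theorem altRow_eq_rowB (k : Nat) : altRow (2 * k + 3) = rowB 1 k := by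
  apply List.ext_getElem?
  intro i
  rw [altRow_getElem?, rowB_getElem?]
  have h213 : 2 * 1 + 2 * k + 1 = 2 * k + 3 := by omega
  rw [h213]
  split_ifs <;> first | rfl | omega

-- the inner append loop of A's first loop, as a map
theorem innerA_eq_altRow (n j : Nat) (hj : j < n) :
    (PySem.List.pyRange 0 ((n : Int) * 2 + 1 - 2 * (j : Int)) 1).foldl
      (fun arr i => if PySem.Int.mod i 2 == 0 then arr ++ ["."] else arr ++ ["0"]) [] =
    altRow (2 * n + 1 - 2 * j) := by
  have hbody : (fun (arr : List String) (i : Int) =>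
      if PySem.Int.mod i 2 == 0 then arr ++ ["."] else arr ++ ["0"]) =
      fun arr i => arr ++ [if PySem.Int.mod i 2 == 0 then "." else "0"] := by
    funext arr i; split_ifs <;> rfl
  rw [hbody, PySem.List.foldl_append_singleton_eq_map]
  have hcast : ((n : Int) * 2 + 1 - 2 * (j : Int)) = ((2 * n + 1 - 2 * j : Nat) : Int) := by
    push_cast [Nat.cast_sub (by omega : 2 * j ≤ 2 * n + 1)]; ring
  rw [hcast, PySem.List.pyRange_zero_natCast]
  simp only [altRow, List.map_map, List.nil_append]
  apply List.map_congr_left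
  intro i _
  simp only [Function.comp]
  have h2 : PySem.Int.mod (↑i) 2 = ((i % 2 : Nat) : Int) := by
    exact_mod_cast PySem.Int.mod_natCast i 2
  rcases Nat.mod_two_eq_zero_or_one i with h | h <;> simp [h2, h] <;> omega

theorem firstA_eq (n : Nat) :
    pyAFirst (n : Int) = (List.range n).map (fun j => altRow (2 * n + 1 - 2 * j)) := by
  unfold pyAFirst
  rw [PySem.List.foldl_append_singleton_eq_map
      (f := fun j => (PySem.List.pyRange 0 ((n : Int) * 2 + 1 - 2 * j) 1).foldl
        (fun arr i => if PySem.Int.mod i 2 == 0 then arr ++ ["."] else arr ++ ["0"]) [])]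
  rw [PySem.List.pyRange_zero_natCast]
  simp only [List.map_map, List.nil_append]
  apply List.map_congr_left
  intro j hj
  simp only [List.mem_range] at hj
  exact innerA_eq_altRow n j hj

-- the ignored-iterator fold is Function.iterate
theorem foldl_ignore_iterate {α β : Type} (f : α → α) (l : List β) (x : α) :
    l.foldl (fun a _ => f a) x = f^[l.length] x := by
  induction l generalizing x with
  | nil => rfl
  | cons b t ih => simp [List.foldl_cons, ih, Function.iterate_succ_apply]

-- iterated modify at a fixed index
theorem iterate_modify {α : Type} (f : α → α) (j m : Nat) (xs : List α) :
    (fun x : List α => x.modify j f)^[m] xs = xs.modify j f^[m] := by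
  induction m generalizing xs with
  | zero => simp
  | succ m ih =>
      rw [Function.iterate_succ_apply, ih]
      apply List.ext_getElem?
      intro i
      simp only [List.getElem?_modify, Option.map_eq_map, Option.map_map]
      cases xs[i]? <;> simp
      split_ifs <;> simp

theorem pyAStep_eq (fa : List (List String)) (k : Nat) :
    pyAStep fa (k : Int) = fa.modify k Trow^[fa.length - 1 - k] := by
  unfold pyAStep
  rw [foldl_ignore_iterate, PySem.List.length_pyRange_one]
  have h1 : (((fa.length : Int) - 1 - (k : Int)).toNat) = fa.length - 1 - k := by omega
  have h2 : ((k : Int)).toNat = k := by omega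
  rw [h1, h2, iterate_modify]
  rfl

-- the outer padding loop, characterized entrywise
theorem secondA_fold (fa : List (List String)) (c : Nat) :
    ∀ i : Nat,
      ((PySem.List.pyRange 0 (c : Int) 1).foldl pyAStep fa).length = fa.length ∧
      ((PySem.List.pyRange 0 (c : Int) 1).foldl pyAStep fa)[i]? =
        (if i < c then fa[i]?.map Trow^[fa.length - 1 - i] else fa[i]?) := by
  induction c with
  | zero => intro i; simp
  | succ c ih =>
      intro i
      have hsplit : PySem.List.pyRange 0 ((c : Int) + 1) 1 =
          PySem.List.pyRange 0 (c : Int) 1 ++ [(c : Int)] :=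
        PySem.List.pyRange_one_succ_right (by omega)
      have hc : ((c + 1 : Nat) : Int) = (c : Int) + 1 := by push_cast; ring
      rw [hc, hsplit, List.foldl_append, List.foldl_cons, List.foldl_nil]
      set G := (PySem.List.pyRange 0 (c : Int) 1).foldl pyAStep fa with hG
      have hlen : G.length = fa.length := (ih 0).1
      rw [pyAStep_eq G c, List.length_modify]
      constructor
      · exact hlen
      · rw [List.getElem?_modify, hlen]
        rcases Nat.lt_trichotomy i c with h | h | h
        · rw [(ih i).2, if_pos h, if_pos (by omega)]
          rcases fa[i]? with _ | row <;> simp [Nat.ne_of_gt h]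
        · subst h
          rw [(ih i).2, if_neg (by omega), if_pos (by omega)]
          rcases fa[i]? with _ | row <;> simp
        · rw [(ih i).2, if_neg (by omega), if_neg (by omega)]
          rcases fa[i]? with _ | row <;> simp [Nat.ne_of_lt h]

theorem Trow_iter_rowB' (k m : Nat) : Trow^[m] (altRow (2 * k + 3)) = rowB (1 + m) k := by
  rw [altRow_eq_rowB, Trow_iter_rowB]

theorem A_eq_map (n : Nat) (hpos : 0 < n) :
    pyramid_arr (n : Int) = (List.range n).map (fun k => rowB (n - k) k) := by
  unfold pyramid_arr pyASecond
  rw [firstA_eq]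
  set fa := ((List.range n).map (fun j => altRow (2 * n + 1 - 2 * j))).reverse with hfa
  have hlenfa : fa.length = n := by simp [hfa]
  have hfaget : ∀ k : Nat, k < n → fa[k]? = some (altRow (2 * k + 3)) := by
    intro k hk
    rw [hfa, List.getElem?_reverse (by simpa using hk)]
    simp only [List.length_map, List.length_range]
    rw [List.getElem?_map]
    have h1 : n - 1 - k < n := by omega
    have harg : 2 * n + 1 - 2 * (n - 1 - k) = 2 * k + 3 := by omega
    simp [List.getElem?_range, h1, harg]
  have hcast : ((fa.length : Int) - 1) = ((n - 1 : Nat) : Int) := by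
    rw [hlenfa]
    omega
  rw [hcast]
  apply List.ext_getElem?
  intro i
  have hmain := (secondA_fold fa (n - 1) i).2
  rw [hmain, hlenfa]
  rcases Nat.lt_or_ge i n with h | h
  · have hrow : fa[i]?.map Trow^[n - 1 - i] = some (rowB (n - i) i) := by
      rw [hfaget i h]
      simp only [Option.map_some]
      rw [Trow_iter_rowB' i (n - 1 - i)]
      have harg : 1 + (n - 1 - i) = n - i := by omega
      rw [harg]
    have hres : (if i < n - 1 then fa[i]?.map Trow^[n - 1 - i] else fa[i]?) =
        some (rowB (n - i) i) := by
      rcases Nat.lt_or_ge i (n - 1) with h2 | h2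
      · rw [if_pos h2, hrow]
      · have h0 : n - 1 - i = 0 := by omega
        rw [if_neg (by omega)]
        rw [h0] at hrow
        simpa using hrow
    rw [hres, List.getElem?_map]
    simp [List.getElem?_range, h]
  · rw [if_neg (by omega), List.getElem?_eq_none (by rw [hlenfa]; omega),
        List.getElem?_eq_none (by simpa using h)]

theorem B_eq_map (n : Nat) :
    pyramid_arr_alt (n : Int) = (List.range n).map (fun k => rowB (n - k) k) := by
  unfold pyramid_arr_alt
  simp only
  rw [PySem.List.foldl_append_singleton_eq_map
      (f := fun k => PySem.List.pyRepeat ["."] ((n : Int) - k) ++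
        (PySem.List.pyRange 0 (2 * k + 1) 1).map
          (fun i => if PySem.Int.mod i 2 == 0 then "0" else ".") ++
        PySem.List.pyRepeat ["."] ((n : Int) - k))]
  rw [PySem.List.pyRange_zero_natCast]
  simp only [List.map_map, List.nil_append]
  apply List.map_congr_left
  intro k hk
  simp only [List.mem_range] at hk
  simp only [Function.comp]
  have hrep : PySem.List.pyRepeat ["."] ((n : Int) - (k : Int)) = List.replicate (n - k) "." := by
    rw [PySem.List.pyRepeat_singleton]
    congr 1
    omega
  have hcore : (PySem.List.pyRange 0 (2 * (k : Int) + 1) 1).map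
      (fun i => if PySem.Int.mod i 2 == 0 then "0" else ".") = coreL k := by
    have h : (2 * (k : Int) + 1) = ((2 * k + 1 : Nat) : Int) := by push_cast; ring
    rw [h, PySem.List.pyRange_zero_natCast]
    simp only [coreL, List.map_map]
    apply List.map_congr_left
    intro i _
    simp only [Function.comp, zero_add]
    have h2 : PySem.Int.mod (↑i) 2 = ((i % 2 : Nat) : Int) := by
      exact_mod_cast PySem.Int.mod_natCast i 2
    rcases Nat.mod_two_eq_zero_or_one i with h | h <;> simp [h2, h] <;> omega
  rw [hrep, hcore, rowB]

-- ===== VERDICT (by name: the statement is the Claim_ definition above) =====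
theorem pyramid_arr_spec : Claim_equal_pyramid_arr := by
  intro level _
  unfold Spec_pyramid_arr
  by_cases h : level ≤ 0
  · have h1 : pyramid_arr level = [] := by
      unfold pyramid_arr pyAFirst
      rw [PySem.List.pyRange_one_eq_nil h]
      simp only [List.foldl_nil, List.reverse_nil]
      unfold pyASecond
      rw [PySem.List.pyRange_one_eq_nil (by decide)]
      rfl
    have h2 : pyramid_arr_alt level = [] := by
      unfold pyramid_arr_alt
      rw [PySem.List.pyRange_one_eq_nil h]
      rfl
    rw [h1, h2]
  · have hn : level = (level.toNat : Int) := by omega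
    rw [hn, A_eq_map level.toNat (by omega), B_eq_map]
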